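-- pv_equiv track=rewrite | github.com/asoh90/localplatformsapp | platforms/adform.py | format_audience_report
-- ===== SOURCE A (Python) =====
-- def format_audience_report(data_provider_name, audience_dict, audience_report_response_json):
--     for audience_report_row in audience_report_response_json:
--         audience_dict["data_provider_name"].append(data_provider_name)
--         audience_dict["date"].append(audience_report_row["date"])
--         audience_dict["segment_id"].append(audience_report_row["segmentId"])
--         audience_dict["category"].append(audience_report_row["category"])
--         audience_dict["segment"].append(audience_report_row["segment"])
--         audience_dict["total"].append(audience_report_row["total"])
--         audience_dict["uniques"].append(audience_report_row["uniques"])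
--
--     return audience_dict
-- ===== SOURCE B (Python) =====
-- # Column-wise reshaping driven by a (destination, source) mapping table,
-- # instead of A's row-wise block of seven hard-coded appends.
-- _COLUMNS = [
--     ("data_provider_name", None),
--     ("date", "date"),
--     ("segment_id", "segmentId"),
--     ("category", "category"),
--     ("segment", "segment"),
--     ("total", "total"),
--     ("uniques", "uniques"),
-- ]
--
--
-- def format_audience_report(data_provider_name, audience_dict, audience_report_response_json):
--     if not audience_report_response_json:
--         return audience_dict  # empty report: nothing to append to any column
--     for dest, src in _COLUMNS:
--         audience_dict[dest].extend(
--             data_provider_name if src is None else row[src]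
--             for row in audience_report_response_json
--         )
--     return audience_dict
-- ===== Notes on version B (the rewrite author's own statement) =====
-- stated objective: alternative
-- what changed: B replaces A's row-wise loop of seven hard-coded appends by a column-wise pass driven by a (destination,source) mapping table, extending each output column with the whole extracted column at once.
import Mathlib
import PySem

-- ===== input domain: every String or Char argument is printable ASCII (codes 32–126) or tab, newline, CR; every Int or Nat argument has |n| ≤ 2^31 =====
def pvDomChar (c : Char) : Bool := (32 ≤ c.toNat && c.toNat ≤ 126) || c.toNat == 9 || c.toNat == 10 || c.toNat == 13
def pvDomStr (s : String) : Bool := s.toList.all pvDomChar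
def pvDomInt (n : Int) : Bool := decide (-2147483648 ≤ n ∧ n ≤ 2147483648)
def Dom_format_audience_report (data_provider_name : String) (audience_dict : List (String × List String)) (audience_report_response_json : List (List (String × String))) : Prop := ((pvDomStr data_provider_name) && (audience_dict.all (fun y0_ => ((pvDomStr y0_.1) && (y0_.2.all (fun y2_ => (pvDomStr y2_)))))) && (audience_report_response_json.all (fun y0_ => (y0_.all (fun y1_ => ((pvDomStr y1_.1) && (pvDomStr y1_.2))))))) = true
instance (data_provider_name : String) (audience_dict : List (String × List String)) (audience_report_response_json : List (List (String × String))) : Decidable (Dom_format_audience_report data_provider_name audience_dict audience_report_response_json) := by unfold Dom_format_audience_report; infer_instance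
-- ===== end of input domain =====

-- ===== PORT A =====
-- B replaces A's row-wise loop by a column-wise pass driven by a mapping table; both Pythons
-- mutate audience_dict in place identically — the equivalence proved is about the return value.
-- first-match lookup row[k]; "" stands for the KeyError case, excluded by Pre_
def pvGetRow (row : List (String × String)) (k : String) : String :=
  match row with
  | [] => ""
  | (k', v) :: rest => if k' == k then v else pvGetRow rest k

-- audience_dict[k].append v on the association list; missing key (KeyError) excluded by Pre_
def pvAppendAt (d : List (String × List String)) (k : String) (v : String) : List (String × List String) :=
  match d with
  | [] => []
  | (k', vs) :: rest => if k' == k then (k', vs ++ [v]) :: rest else (k', vs) :: pvAppendAt rest k v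

def format_audience_report (data_provider_name : String) (audience_dict : List (String × List String)) (audience_report_response_json : List (List (String × String))) : List (String × List String) :=
  audience_report_response_json.foldl (fun d row =>
    let d := pvAppendAt d "data_provider_name" data_provider_name
    let d := pvAppendAt d "date" (pvGetRow row "date")
    let d := pvAppendAt d "segment_id" (pvGetRow row "segmentId")
    let d := pvAppendAt d "category" (pvGetRow row "category")
    let d := pvAppendAt d "segment" (pvGetRow row "segment")
    let d := pvAppendAt d "total" (pvGetRow row "total")
    pvAppendAt d "uniques" (pvGetRow row "uniques")) audience_dict

-- ===== PORT B =====
def pvColumns : List (String × Option String) :=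
  [("data_provider_name", none), ("date", some "date"), ("segment_id", some "segmentId"),
   ("category", some "category"), ("segment", some "segment"), ("total", some "total"),
   ("uniques", some "uniques")]

-- the generator expression's element for one row
def pvColVal (data_provider_name : String) (src : Option String) (row : List (String × String)) : String :=
  match src with
  | none => data_provider_name
  | some k => pvGetRow row k

-- audience_dict[k].extend vals; missing key (KeyError) excluded by Pre_
def pvExtendAt (d : List (String × List String)) (k : String) (vals : List String) : List (String × List String) :=
  match d with
  | [] => []
  | (k', vs) :: rest => if k' == k then (k', vs ++ vals) :: rest else (k', vs) :: pvExtendAt rest k vals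

def format_audience_report_alt (data_provider_name : String) (audience_dict : List (String × List String)) (audience_report_response_json : List (List (String × String))) : List (String × List String) :=
  match audience_report_response_json with
  | [] => audience_dict  -- empty report: nothing to append to any column
  | _ =>
    pvColumns.foldl (fun d p =>
      pvExtendAt d p.1 (audience_report_response_json.map (pvColVal data_provider_name p.2))) audience_dict

-- ===== PRECONDITION & SPEC =====
-- Pre_ excludes exactly the KeyError inputs of A: a nonempty report while one of the seven output
-- keys is missing from audience_dict, or a row missing one of the six source keys.
def Pre_format_audience_report (data_provider_name : String) (audience_dict : List (String × List String)) (audience_report_response_json : List (List (String × String))) : Prop :=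
  (audience_report_response_json ≠ [] →
    ["data_provider_name", "date", "segment_id", "category", "segment", "total", "uniques"].all
      (fun k => audience_dict.any (fun p => p.1 == k)) = true) ∧
  ∀ row ∈ audience_report_response_json,
    ["date", "segmentId", "category", "segment", "total", "uniques"].all
      (fun k => row.any (fun p => p.1 == k)) = true
instance (data_provider_name : String) (audience_dict : List (String × List String)) (audience_report_response_json : List (List (String × String))) : Decidable (Pre_format_audience_report data_provider_name audience_dict audience_report_response_json) := by unfold Pre_format_audience_report; infer_instance

def pvWitness_format_audience_report : String × (List (String × List String)) × (List (List (String × String))) :=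
  ("dp",
   [("data_provider_name", []), ("date", []), ("segment_id", []), ("category", []),
    ("segment", []), ("total", []), ("uniques", [])],
   [[("date", "d"), ("segmentId", "s"), ("category", "c"), ("segment", "g"),
     ("total", "t"), ("uniques", "u")]])

def Spec_format_audience_report (data_provider_name : String) (audience_dict : List (String × List String)) (audience_report_response_json : List (List (String × String))) (out : List (String × List String)) : Prop := out = format_audience_report_alt data_provider_name audience_dict audience_report_response_json
instance (data_provider_name : String) (audience_dict : List (String × List String)) (audience_report_response_json : List (List (String × String))) (out : List (String × List String)) : Decidable (Spec_format_audience_report data_provider_name audience_dict audience_report_response_json out) := by unfold Spec_format_audience_report; infer_instance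

-- ===== CLAIM (what is proved, stated in full; the proofs are below) =====
def Claim_equal_format_audience_report : Prop := ∀ (data_provider_name : String) (audience_dict : List (String × List String)) (audience_report_response_json : List (List (String × String))), Dom_format_audience_report data_provider_name audience_dict audience_report_response_json → Pre_format_audience_report data_provider_name audience_dict audience_report_response_json → Spec_format_audience_report data_provider_name audience_dict audience_report_response_json (format_audience_report data_provider_name audience_dict audience_report_response_json)

-- ===== LEMMAS AND PROOFS =====
theorem pvExtendAt_nil (d : List (String × List String)) (k : String) :
    pvExtendAt d k [] = d := by
  induction d with
  | nil => rfl
  | cons h t ih =>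
    cases h with | mk k' vs =>
    by_cases hk : k' == k
    · simp [pvExtendAt, hk]
    · simp [pvExtendAt, hk, ih]

theorem pvExtendAt_snoc (d : List (String × List String)) (k : String) (vs : List String) (v : String) :
    pvExtendAt d k (vs ++ [v]) = pvAppendAt (pvExtendAt d k vs) k v := by
  induction d with
  | nil => rfl
  | cons h t ih =>
    cases h with | mk k' vs0 =>
    by_cases hk : k' == k
    · simp [pvExtendAt, pvAppendAt, hk]
    · simp [pvExtendAt, pvAppendAt, hk, ih]

theorem pvAppendAt_extendAt_comm (d : List (String × List String)) (k k' : String) (v : String)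
    (vs : List String) (hne : k ≠ k') :
    pvAppendAt (pvExtendAt d k' vs) k v = pvExtendAt (pvAppendAt d k v) k' vs := by
  induction d with
  | nil => rfl
  | cons h t ih =>
    cases h with | mk kh vh =>
    by_cases h1 : kh == k'
    · have h2 : (kh == k) = false := by
        have : kh = k' := by simpa using h1
        subst this
        simpa using fun hc => hne hc.symm
      simp [pvExtendAt, pvAppendAt, h1, h2]
    · by_cases h2 : kh == k
      · simp [pvExtendAt, pvAppendAt, h1, h2]
      · simp [pvExtendAt, pvAppendAt, h1, h2, ih]

theorem foldl_extend_appendAt (m : List (String × Option String)) (F : String × Option String → List String)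
    (d : List (String × List String)) (k : String) (v : String)
    (hk : k ∉ m.map Prod.fst) :
    m.foldl (fun d p => pvExtendAt d p.1 (F p)) (pvAppendAt d k v)
      = pvAppendAt (m.foldl (fun d p => pvExtendAt d p.1 (F p)) d) k v := by
  induction m generalizing d with
  | nil => rfl
  | cons p m ih =>
    simp only [List.map_cons, List.mem_cons, not_or] at hk
    simp only [List.foldl_cons]
    rw [← pvAppendAt_extendAt_comm d k p.1 v (F p) hk.1, ih _ hk.2]

theorem foldl_extend_snoc (m : List (String × Option String)) (dpn : String)
    (rows : List (List (String × String))) (r : List (String × String))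
    (d : List (String × List String)) (hnd : (m.map Prod.fst).Nodup) :
    m.foldl (fun d p => pvExtendAt d p.1 ((rows ++ [r]).map (pvColVal dpn p.2))) d
      = m.foldl (fun d p => pvAppendAt d p.1 (pvColVal dpn p.2 r))
          (m.foldl (fun d p => pvExtendAt d p.1 (rows.map (pvColVal dpn p.2))) d) := by
  induction m generalizing d with
  | nil => rfl
  | cons p m ih =>
    simp only [List.map_cons, List.nodup_cons] at hnd
    simp only [List.foldl_cons]
    rw [show List.map (pvColVal dpn p.2) (rows ++ [r])
          = List.map (pvColVal dpn p.2) rows ++ [pvColVal dpn p.2 r] from by simp]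
    rw [pvExtendAt_snoc d p.1 (rows.map (pvColVal dpn p.2)) (pvColVal dpn p.2 r)]
    rw [ih _ hnd.2]
    rw [foldl_extend_appendAt m _ _ p.1 _ hnd.1]

-- A equals the column-wise fold for EVERY row list (also the empty one)
theorem format_audience_report_eq_colfold (dpn : String) (d : List (String × List String))
    (rows : List (List (String × String))) :
    format_audience_report dpn d rows
      = pvColumns.foldl (fun d p => pvExtendAt d p.1 (rows.map (pvColVal dpn p.2))) d := by
  induction rows using List.reverseRecOn with
  | nil =>
    simp [format_audience_report, pvColumns, pvExtendAt_nil]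
  | append_singleton rows r ih =>
    have hnd : (pvColumns.map Prod.fst).Nodup := by decide
    unfold format_audience_report at *
    rw [List.foldl_append, ih, foldl_extend_snoc pvColumns dpn rows r d hnd]
    simp [pvColumns, pvColVal]

theorem format_audience_report_eq_alt (dpn : String) (d : List (String × List String))
    (rows : List (List (String × String))) :
    format_audience_report dpn d rows = format_audience_report_alt dpn d rows := by
  cases rows with
  | nil => rfl
  | cons r t =>
    unfold format_audience_report_alt
    exact format_audience_report_eq_colfold dpn d (r :: t)

-- ===== VERDICT (by name: the statement is the Claim_ definition above) =====
theorem format_audience_report_spec : Claim_equal_format_audience_report := by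
  intro dpn d rows _ _
  unfold Spec_format_audience_report
  exact format_audience_report_eq_alt dpn d rows
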